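-- pv_equiv track=rewrite | github.com/juzigithub/deepnoid | brats2018/feature_extractor.py | add_values_to_key
-- ===== SOURCE A (Python) =====
-- def add_values_to_key(target_list):
--     subdict = {}
--     for i in range(len(target_list)):
--         for k,v in target_list[i].items():
--             subdict.setdefault(k, [])
--             subdict[k].append(v)
--     for k,v in subdict.items():
--         subdict[k] = tuple(subdict[k])
--     return subdict
-- ===== SOURCE B (Python) =====
-- def add_values_to_key(target_list):
--     keys = list(dict.fromkeys(k for d in target_list for k in d))
--     return {k: tuple(d[k] for d in target_list if k in d) for k in keys}
-- ===== Notes on version B (the rewrite author's own statement) =====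
-- stated objective: idiomatic
-- what changed: B inverts the loop nesting: it collects the keys in first-appearance order once, then builds each key's value tuple directly by scanning the dicts, eliminating A's per-key list accumulation and the second list-to-tuple rewrite pass.
import Mathlib
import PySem

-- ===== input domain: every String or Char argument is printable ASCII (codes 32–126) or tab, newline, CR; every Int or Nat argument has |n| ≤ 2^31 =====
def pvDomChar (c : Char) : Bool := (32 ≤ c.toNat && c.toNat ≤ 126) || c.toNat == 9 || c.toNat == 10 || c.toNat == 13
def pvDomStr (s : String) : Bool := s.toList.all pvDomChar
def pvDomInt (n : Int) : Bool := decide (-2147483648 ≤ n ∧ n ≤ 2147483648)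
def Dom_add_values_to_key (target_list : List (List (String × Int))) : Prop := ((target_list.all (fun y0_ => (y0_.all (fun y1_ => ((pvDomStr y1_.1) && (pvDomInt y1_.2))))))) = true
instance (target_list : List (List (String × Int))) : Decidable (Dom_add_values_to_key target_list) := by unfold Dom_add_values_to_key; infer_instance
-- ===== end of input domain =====

-- B inverts A's loop nesting (keys collected first, then one scan of the dicts per key); idiomatic, same cost class.


-- ===== PORT A =====
-- each inner 'List (String × Int)' stands for a Python dict: PySem.Dict.ofList gives its canonical items
-- (last value wins, first position), exactly dict(pairs); '.items()' then iterates those items.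
-- 'subdict.setdefault(k, []); subdict[k].append(v)' is 'subdict[k] = subdict.get(k, []) + [v]' = PySem.Dict.modify.
def add_values_to_key (target_list : List (List (String × Int))) : List (String × List Int) :=
  let subdict : PySem.Dict String (List Int) :=
    (PySem.List.pyRange 0 (PySem.List.len target_list)).foldl
      (fun d i =>
        ((PySem.Dict.ofList (PySem.List.pyGetD target_list i [])).items).foldl
          (fun d kv => d.modify kv.1 [] (fun l => l ++ [kv.2])) d)
      PySem.Dict.empty
  -- 'for k,v in subdict.items(): subdict[k] = tuple(subdict[k])' — tuple is the identity under the List Int convention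
  (subdict.items.foldl (fun d kv => d.insert kv.1 kv.2) subdict).items

-- ===== PORT B =====
-- keys = list(dict.fromkeys(k for d in target_list for k in d)); 'for k in d' iterates the dict's keys
def add_values_to_key_alt (target_list : List (List (String × Int))) : List (String × List Int) :=
  let keys := PySem.List.dedup (target_list.flatMap (fun d => (PySem.Dict.ofList d).keys))
  -- {k: tuple(d[k] for d in target_list if k in d) for k in keys}: keys are distinct, so the dict is this map
  keys.map (fun k => (k, target_list.filterMap (fun d => (PySem.Dict.ofList d).get? k)))

-- ===== PRECONDITION & SPEC =====
def Spec_add_values_to_key (target_list : List (List (String × Int))) (out : List (String × List Int)) : Prop := out = add_values_to_key_alt target_list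
instance (target_list : List (List (String × Int))) (out : List (String × List Int)) : Decidable (Spec_add_values_to_key target_list out) := by unfold Spec_add_values_to_key; infer_instance

-- ===== CLAIM (what is proved, stated in full; the proofs are below) =====
def Claim_equal_add_values_to_key : Prop := ∀ (target_list : List (List (String × Int))), Dom_add_values_to_key target_list → Spec_add_values_to_key target_list (add_values_to_key target_list)

-- ===== LEMMAS AND PROOFS =====

-- re-inserting a present binding leaves the dict unchanged (items keep order and values)
theorem insert_self_of_mem_items {κ ν : Type} [BEq κ] [LawfulBEq κ]
    (d : PySem.Dict κ ν) {k : κ} {v : ν} (h : (k, v) ∈ d.items) (hnd : d.keys.Nodup) :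
    d.insert k v = d := by
  apply PySem.Dict.ext
  have hc : d.contains k = true := by
    rw [PySem.Dict.contains_iff_mem_keys]
    exact List.mem_map_of_mem h
  rw [PySem.Dict.items_insert_of_contains d v hc]
  conv_rhs => rw [← List.map_id d.items]
  apply List.map_congr_left
  intro p hp
  by_cases hk : p.1 = k
  · have h1 : d.get? k = some v := PySem.Dict.get?_of_mem_items d h hnd
    have h2 : d.get? p.1 = some p.2 := by
      cases p; exact PySem.Dict.get?_of_mem_items d hp hnd
    rw [hk, h1] at h2
    have : p = (k, v) := by
      cases p; simp_all
    simp [this]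
  · simp [hk]

theorem reinsert_items_foldl {κ ν : Type} [BEq κ] [LawfulBEq κ]
    (d : PySem.Dict κ ν) (l : List (κ × ν)) (hl : ∀ p ∈ l, p ∈ d.items) (hnd : d.keys.Nodup) :
    l.foldl (fun d kv => d.insert kv.1 kv.2) d = d := by
  induction l with
  | nil => rfl
  | cons p rest ih =>
    have hp : p ∈ d.items := hl p (List.mem_cons_self)
    have : d.insert p.1 p.2 = d := insert_self_of_mem_items d (by exact hp) hnd
    simp only [List.foldl_cons, this]
    exact ih (fun q hq => hl q (List.mem_cons_of_mem _ hq))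

-- with distinct keys, the values at key k in an items list are exactly the (at most one) looked-up value
theorem filter_map_eq_get?_toList {ν : Type} (k : String) :
    ∀ (it : List (String × ν)), (it.map Prod.fst).Nodup →
    (it.filter (fun p => p.1 == k)).map (fun p => p.2) = ((PySem.Dict.mk it).get? k).toList := by
  intro it
  induction it with
  | nil => intro _; rfl
  | cons p rest ih =>
    intro hnd
    simp only [List.map_cons, List.nodup_cons] at hnd
    rw [List.filter_cons]
    rw [PySem.Dict.get?_mk_cons]
    by_cases hk : p.1 = k
    · simp only [hk, BEq.rfl, if_true, List.map_cons, Option.toList_some]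
      have : rest.filter (fun q => q.1 == k) = [] := by
        apply List.filter_eq_nil_iff.mpr
        intro q hq
        simp only [beq_iff_eq]
        intro hqk
        exact hnd.1 (by rw [hk, ← hqk]; exact List.mem_map_of_mem hq)
      simp [this]
    · simp only [beq_iff_eq, hk, if_false]
      exact ih hnd.2

theorem filterMap_get?_eq (target_list : List (List (String × Int))) (k : String) :
    target_list.filterMap (fun d => (PySem.Dict.ofList d).get? k)
      = ((target_list.map (fun d => (PySem.Dict.ofList d).items)).flatten.filter
          (fun p => p.1 == k)).map (fun p => p.2) := by
  induction target_list with
  | nil => rfl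
  | cons d rest ih =>
    simp only [List.filterMap_cons, List.map_cons, List.flatten_cons, List.filter_append,
      List.map_append]
    have hnd : ((PySem.Dict.ofList d).items.map Prod.fst).Nodup :=
      PySem.Dict.nodup_keys_ofList d
    have h1 := filter_map_eq_get?_toList (ν := Int) k (PySem.Dict.ofList d).items hnd
    have hmk : PySem.Dict.mk (PySem.Dict.ofList d).items = PySem.Dict.ofList d := rfl
    rw [hmk] at h1
    cases hg : (PySem.Dict.ofList d).get? k with
    | none => rw [hg] at h1; simp [h1, ih]
    | some v => rw [hg] at h1; simp [h1, ih]

-- ===== VERDICT (by name: the statement is the Claim_ definition above) =====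
theorem add_values_to_key_spec : Claim_equal_add_values_to_key := by
  intro target_list _
  unfold Spec_add_values_to_key add_values_to_key add_values_to_key_alt
  dsimp only
  have hsub :
      (PySem.List.pyRange 0 (PySem.List.len target_list)).foldl
        (fun d i =>
          ((PySem.Dict.ofList (PySem.List.pyGetD target_list i [])).items).foldl
            (fun d kv => d.modify kv.1 [] (fun l => l ++ [kv.2])) d)
        PySem.Dict.empty
      = ((target_list.map (fun d => (PySem.Dict.ofList d).items)).flatten).foldl
          (fun d kv => d.modify kv.1 [] (fun l => l ++ [kv.2])) PySem.Dict.empty := by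
    refine (PySem.List.foldl_pyRange_pyGetD target_list []
          (fun acc x => ((PySem.Dict.ofList x).items).foldl
            (fun d kv => d.modify kv.1 [] (fun l => l ++ [kv.2])) acc)
          PySem.Dict.empty (le_refl 0)).trans ?_
    rw [List.foldl_flatten, List.foldl_map]
    simp
  rw [hsub]
  have hnd : (((target_list.map (fun d => (PySem.Dict.ofList d).items)).flatten).foldl
      (fun d kv => d.modify kv.1 [] (fun l => l ++ [kv.2])) PySem.Dict.empty).keys.Nodup :=
    PySem.Dict.nodup_keys_foldl_modify_key _ (fun kv : String × Int => kv.1) []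
      (fun _ (kv : String × Int) => fun l => l ++ [kv.2]) PySem.Dict.empty (by simp [PySem.Dict.keys_empty])
  rw [reinsert_items_foldl _ _ (fun p hp => hp) hnd]
  rw [PySem.Dict.items_eq_map_keys _ hnd []]
  have hkeys : (((target_list.map (fun d => (PySem.Dict.ofList d).items)).flatten).foldl
      (fun d kv => d.modify kv.1 [] (fun l => l ++ [kv.2])) PySem.Dict.empty).keys
      = PySem.List.dedup (target_list.flatMap (fun d => (PySem.Dict.ofList d).keys)) := by
    rw [PySem.Dict.keys_foldl_modify_key _ (fun kv : String × Int => kv.1) []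
      (fun _ (kv : String × Int) => fun l => l ++ [kv.2]) PySem.Dict.empty]
    rw [PySem.Dict.keys_empty, PySem.Set.update_nil_left, PySem.List.dedup_eq_ofList]
    congr 1
    simp [PySem.Dict.keys, List.map_flatten, List.flatMap_def, Function.comp_def]
  rw [hkeys]
  apply List.map_congr_left
  intro k _
  rw [filterMap_get?_eq]
  rw [PySem.Dict.getD_foldl_modify_append _ PySem.Dict.empty k]
  simp [PySem.Dict.getD_empty]
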